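-- pv_equiv track=rewrite | github.com/minorsevenflatfive/foobar_challenge | bunny_prisoner_locating.py | solution
-- ===== SOURCE A (Python) =====
-- def solution(x,y):
--     prisoner_id = 1
--     traverse_x = 2
--     for _ in range(x-1):
--         prisoner_id = prisoner_id + traverse_x
--         traverse_x = traverse_x + 1
--     for _ in range(y-1):
--         prisoner_id = prisoner_id + x
--         x = x + 1
--     return prisoner_id
-- ===== SOURCE B (Python) =====
-- def solution(x, y):
--     a = max(x - 1, 0)
--     b = max(y - 1, 0)
--     return 1 + 2 * a + a * (a - 1) // 2 + b * x + b * (b - 1) // 2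
-- ===== Notes on version B (the rewrite author's own statement) =====
-- stated objective: faster
-- what changed: replaces the two accumulation loops by a closed-form triangular-number formula
import Mathlib
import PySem

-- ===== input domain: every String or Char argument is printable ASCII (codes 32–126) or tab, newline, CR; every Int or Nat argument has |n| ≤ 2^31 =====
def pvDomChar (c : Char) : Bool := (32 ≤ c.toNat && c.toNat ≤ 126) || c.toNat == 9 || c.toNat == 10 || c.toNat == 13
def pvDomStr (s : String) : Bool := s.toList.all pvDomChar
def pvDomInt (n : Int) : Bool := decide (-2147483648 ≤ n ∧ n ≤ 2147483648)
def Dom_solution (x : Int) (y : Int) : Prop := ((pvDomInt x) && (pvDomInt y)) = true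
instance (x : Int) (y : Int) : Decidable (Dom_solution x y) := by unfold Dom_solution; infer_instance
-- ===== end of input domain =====

-- B replaces A's two O(x+y) accumulation loops by a closed-form triangular-number formula (objective: faster, asymptotic).

-- ===== PORT A =====
-- both loops add the running step to the accumulator and increment the step; state = (prisoner_id, step)
def solution (x : Int) (y : Int) : Int :=
  let s1 := (PySem.List.pyRange 0 (x - 1) 1).foldl
    (fun (st : Int × Int) _ => (st.1 + st.2, st.2 + 1)) (1, 2)
  let s2 := (PySem.List.pyRange 0 (y - 1) 1).foldl
    (fun (st : Int × Int) _ => (st.1 + st.2, st.2 + 1)) (s1.1, x)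
  s2.1

-- ===== PORT B =====
def solution_alt (x : Int) (y : Int) : Int :=
  let a := max (x - 1) 0
  let b := max (y - 1) 0
  1 + 2 * a + PySem.Int.floordiv (a * (a - 1)) 2 + b * x + PySem.Int.floordiv (b * (b - 1)) 2

-- ===== PRECONDITION & SPEC =====
def Spec_solution (x : Int) (y : Int) (out : Int) : Prop := out = solution_alt x y
instance (x : Int) (y : Int) (out : Int) : Decidable (Spec_solution x y out) := by unfold Spec_solution; infer_instance

-- ===== CLAIM (what is proved, stated in full; the proofs are below) =====
def Claim_equal_solution : Prop := ∀ (x : Int) (y : Int), Dom_solution x y → Spec_solution x y (solution x y)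

-- ===== LEMMAS AND PROOFS =====

-- closed form of A's loop body folded over any list, stated multiplied by 2 to stay division-free
theorem pv_fold_closed (l : List Int) : ∀ (p t : Int),
    2 * (l.foldl (fun (st : Int × Int) _ => (st.1 + st.2, st.2 + 1)) (p, t)).1
      = 2 * p + 2 * (l.length : Int) * t + (l.length : Int) * ((l.length : Int) - 1) := by
  induction l with
  | nil => intro p t; simp
  | cons a l ih =>
    intro p t
    have h := ih (p + t) (t + 1)
    simp only [List.foldl_cons, List.length_cons] at *
    push_cast at *
    linarith

theorem pv_floordiv_two_mul (k : Int) : PySem.Int.floordiv (2 * k) 2 = k := by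
  rw [PySem.Int.floordiv_eq_ediv_of_pos (by norm_num)]
  omega

theorem pv_half_prod (a : Int) :
    2 * PySem.Int.floordiv (a * (a - 1)) 2 = a * (a - 1) := by
  rcases Int.even_or_odd a with ⟨k, hk⟩ | ⟨k, hk⟩
  · have : a * (a - 1) = 2 * (k * (a - 1)) := by rw [hk]; ring
    rw [this, pv_floordiv_two_mul]
  · have : a * (a - 1) = 2 * (a * k) := by rw [hk]; ring
    rw [this, pv_floordiv_two_mul]

-- ===== VERDICT (by name: the statement is the Claim_ definition above) =====
theorem solution_spec : Claim_equal_solution := by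
  intro x y _
  unfold Spec_solution solution solution_alt
  simp only []
  have hx : ((PySem.List.pyRange 0 (x - 1) 1).length : Int) = max (x - 1) 0 := by
    rw [PySem.List.length_pyRange_one]; omega
  have hy : ((PySem.List.pyRange 0 (y - 1) 1).length : Int) = max (y - 1) 0 := by
    rw [PySem.List.length_pyRange_one]; omega
  set a := max (x - 1) 0 with ha
  set b := max (y - 1) 0 with hb
  have h1 := pv_fold_closed (PySem.List.pyRange 0 (x - 1) 1) 1 2
  have h2 := pv_fold_closed (PySem.List.pyRange 0 (y - 1) 1)
      ((PySem.List.pyRange 0 (x - 1) 1).foldl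
        (fun (st : Int × Int) _ => (st.1 + st.2, st.2 + 1)) (1, 2)).1 x
  rw [hx] at h1
  rw [hy] at h2
  have hda := pv_half_prod a
  have hdb := pv_half_prod b
  -- everything is linear once a*(a-1), b*(b-1), b*x, a are atoms
  nlinarith [h1, h2, hda, hdb]
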